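-- pv_equiv track=rewrite | github.com/limonyellow/corona-testing | utils/binary.py | find_groups_that_match
-- ===== SOURCE A (Python) =====
-- from typing import List, Dict
-- from itertools import combinations
--
-- def find_groups_that_match(iterable: List[int], match: int, size_of_group: int = None) -> List[List[int]]:
--     """
--     Creates combinations of numbers in the given size.
--     For each combination checks if all of its elements connected by bitwise 'or', equals the number to match.
--     If so, adds the combination to the returned list.
--     @param iterable: List of numbers.
--     @param match: Number to check if the created groups are match with.
--     @param size_of_group: The number of numbers in a group.
--     @return: List with all the groups that matches the match number.
--     """
--     if not size_of_group:
--         size_of_group = len(iterable)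
--     or_matches = []
--     all_combo = combinations(iterable, size_of_group)
--     for combo in all_combo:
--         or_res = 0
--         for bin_num in combo:
--             or_res = or_res | bin_num
--         if or_res == match:
--             or_matches.append(list(combo))
--     return or_matches
-- ===== SOURCE B (Python) =====
-- def find_groups_that_match(iterable, match, size_of_group=None):
--     # Iterative pick/skip DFS with an explicit stack, carrying the running OR
--     # and pruning any branch whose partial OR already has bits outside match.
--     k = len(iterable) if not size_of_group else size_of_group
--     items = list(iterable)
--     res = []
--     stack = [(0, 0, k, [])]  # (index, acc, still needed, chosen so far)
--     while stack:
--         i, acc, need, chosen = stack.pop()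
--         if need == 0:
--             if acc == match:
--                 res.append(chosen)
--             continue
--         if len(items) - i < need:  # prune: not enough items left
--             continue
--         x = items[i]
--         stack.append((i + 1, acc, need, chosen))          # skip items[i]
--         if (acc | x) | match == match:                    # prune: x must fit inside match
--             stack.append((i + 1, acc | x, need - 1, chosen + [x]))  # pick items[i]
--     return res
-- ===== Notes on version B (the rewrite author's own statement) =====
-- stated objective: alternative
-- what changed: Replaces the generate-all-combinations-then-test loop by a recursive pick/skip DFS that carries the running OR and prunes any branch whose partial OR already has bits outside match, so non-subset elements are never expanded.
import Mathlib
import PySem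

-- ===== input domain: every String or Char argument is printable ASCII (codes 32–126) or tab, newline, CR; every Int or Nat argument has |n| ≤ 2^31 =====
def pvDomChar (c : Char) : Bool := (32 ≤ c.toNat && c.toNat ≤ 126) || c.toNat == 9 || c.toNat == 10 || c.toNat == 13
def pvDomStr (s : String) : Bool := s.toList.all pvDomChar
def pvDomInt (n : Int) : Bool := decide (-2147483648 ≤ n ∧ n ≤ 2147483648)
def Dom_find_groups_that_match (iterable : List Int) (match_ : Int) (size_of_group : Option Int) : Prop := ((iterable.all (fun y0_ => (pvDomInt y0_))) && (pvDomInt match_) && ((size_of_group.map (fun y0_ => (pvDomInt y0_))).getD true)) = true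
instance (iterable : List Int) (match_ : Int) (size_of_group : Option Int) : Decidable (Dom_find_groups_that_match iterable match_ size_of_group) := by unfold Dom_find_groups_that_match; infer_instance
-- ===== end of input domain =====

-- B replaces A's generate-all-combinations-then-test loop by a pick/skip DFS that carries the
-- running OR and prunes branches whose partial OR already has bits outside match (same output, same order).

-- ===== PORT A =====
-- itertools.combinations(xs, k) in Python's (lexicographic-by-index) order
def pyCombinations (k : Nat) (xs : List Int) : List (List Int) :=
  match k, xs with
  | 0, _ => [[]]
  | _ + 1, [] => []
  | t + 1, x :: rest =>
      (pyCombinations t rest).map (fun c => x :: c) ++ pyCombinations (t + 1) rest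

def find_groups_that_match (iterable : List Int) (match_ : Int) (size_of_group : Option Int) : List (List Int) :=
  -- 'if not size_of_group: size_of_group = len(iterable)'  (None and 0 are falsy)
  let size : Nat :=
    match size_of_group with
    | none => iterable.length
    | some s => if s = 0 then iterable.length else s.toNat   -- s.toNat exact under Pre_ (0 ≤ s)
  (pyCombinations size iterable).foldl
    (fun or_matches combo =>
      let or_res := combo.foldl (fun a b => PySem.Int.bor a b) 0
      if or_res = match_ then or_matches ++ [combo] else or_matches) []

-- ===== PORT B =====
-- the while-stack loop of Source B; a frame (items[i:], acc, need, chosen) stands for Python's (i, acc, need, chosen)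
def stackRun (match_ : Int) (stack : List (List Int × Int × Nat × List Int))
    (res : List (List Int)) : List (List Int) :=
  match stack with
  | [] => res
  | (items, acc, need, chosen) :: rest =>
    match need with
    | 0 => stackRun match_ rest (if acc = match_ then res ++ [chosen] else res)
    | t + 1 =>
      match items with
      | [] => stackRun match_ rest res                        -- 'len(items) - i < need'
      | x :: tail =>
        if tail.length + 1 < t + 1 then stackRun match_ rest res  -- 'len(items) - i < need'
        else
          -- push the skip-items[i] frame, and on top of it (prune) the pick-items[i] frame
          stackRun match_
            (if PySem.Int.bor (PySem.Int.bor acc x) match_ = match_ then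
                (tail, PySem.Int.bor acc x, t, chosen ++ [x]) ::
                  (tail, acc, t + 1, chosen) :: rest
              else (tail, acc, t + 1, chosen) :: rest) res
termination_by (stack.map (fun f => 3 ^ f.1.length)).sum
decreasing_by
  all_goals simp
  all_goals
    (have h1 : 0 < 3 ^ tail.length := Nat.pow_pos (by omega)
     have h2 : 3 ^ (tail.length + 1) = 3 ^ tail.length * 3 := pow_succ 3 tail.length
     split <;> simp <;> omega)

def find_groups_that_match_alt (iterable : List Int) (match_ : Int) (size_of_group : Option Int) : List (List Int) :=
  let k : Nat :=
    match size_of_group with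
    | none => iterable.length
    | some s => if s = 0 then iterable.length else s.toNat   -- s.toNat exact under Pre_ (0 ≤ s)
  stackRun match_ [(iterable, 0, k, [])] []

-- ===== PRECONDITION & SPEC =====
-- Pre_ excludes only size_of_group = some s with s < 0, where Python's combinations raises ValueError.
def Pre_find_groups_that_match (iterable : List Int) (match_ : Int) (size_of_group : Option Int) : Prop :=
  0 ≤ size_of_group.getD 0
instance (iterable : List Int) (match_ : Int) (size_of_group : Option Int) : Decidable (Pre_find_groups_that_match iterable match_ size_of_group) := by unfold Pre_find_groups_that_match; infer_instance

def pvWitness_find_groups_that_match : List Int × Int × Option Int := ([1, 2, 3], 3, some 2)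

def Spec_find_groups_that_match (iterable : List Int) (match_ : Int) (size_of_group : Option Int) (out : List (List Int)) : Prop := out = find_groups_that_match_alt iterable match_ size_of_group
instance (iterable : List Int) (match_ : Int) (size_of_group : Option Int) (out : List (List Int)) : Decidable (Spec_find_groups_that_match iterable match_ size_of_group out) := by unfold Spec_find_groups_that_match; infer_instance

-- ===== CLAIM (what is proved, stated in full; the proofs are below) =====
def Claim_equal_find_groups_that_match : Prop := ∀ (iterable : List Int) (match_ : Int) (size_of_group : Option Int), Dom_find_groups_that_match iterable match_ size_of_group → Pre_find_groups_that_match iterable match_ size_of_group → Spec_find_groups_that_match iterable match_ size_of_group (find_groups_that_match iterable match_ size_of_group)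

-- ===== LEMMAS AND PROOFS =====

-- Recursive description of one DFS frame (proof-side only).
def dfsGroups (match_ : Int) (acc : Int) (need : Nat) (items : List Int) : List (List Int) :=
  match need, items with
  | 0, _ => if acc = match_ then [[]] else []
  | _ + 1, [] => []
  | t + 1, x :: rest =>
      (if PySem.Int.bor (PySem.Int.bor acc x) match_ = match_ then
          (dfsGroups match_ (PySem.Int.bor acc x) t rest).map (fun c => x :: c)
        else []) ++ dfsGroups match_ acc (t + 1) rest

-- Output of one frame: its DFS results, each prefixed with what was already chosen.
def frameOut (match_ : Int) (f : List Int × Int × Nat × List Int) : List (List Int) :=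
  (dfsGroups match_ f.2.1 f.2.2.1 f.1).map (fun c => f.2.2.2 ++ c)

-- Bits of an integer in Python's infinite two's-complement reading.
def intBit (a : Int) (k : Nat) : Bool :=
  if 0 ≤ a then a.toNat.testBit k else !((-a - 1).toNat.testBit k)

lemma sub_and_eq_ldiff (m : Nat) : ∀ n : Nat, m - (m &&& n) = Nat.ldiff m n := by
  induction m using Nat.binaryRec with
  | zero =>
      intro n
      simp only [Nat.zero_sub]
      exact (Nat.eq_of_testBit_eq (fun k => by simp [Nat.testBit_ldiff])).symm
  | bit b m ih =>
      intro n
      rw [← Nat.bit_bodd_div2 n, Nat.land_bit, Nat.ldiff_bit]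
      have h1 := ih n.div2
      have h2 : m &&& n.div2 ≤ m := Nat.and_le_left
      cases b <;> cases n.bodd <;>
        simp only [Nat.bit_val, Bool.and_true, Bool.and_false, Bool.not_true, Bool.not_false,
          Bool.toNat_false, Bool.toNat_true] <;> omega

lemma intBit_bor (a b : Int) (k : Nat) :
    intBit (PySem.Int.bor a b) k = (intBit a k || intBit b k) := by
  unfold intBit PySem.Int.bor
  by_cases ha : 0 ≤ a <;> by_cases hb : 0 ≤ b <;>
    simp only [ha, hb, if_true, if_false]
  · have : (0:Int) ≤ ↑(a.toNat ||| b.toNat) := by positivity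
    simp [this]
  · have hx : (0:Int) ≤ ((-b - 1).toNat - ((-b - 1).toNat &&& a.toNat) : Nat) := by positivity
    have hneg : ¬ (0:Int) ≤ -((((-b - 1).toNat - ((-b - 1).toNat &&& a.toNat) : Nat)) : Int) - 1 := by omega
    rw [if_neg hneg]
    have ht : (-(-((((-b - 1).toNat - ((-b - 1).toNat &&& a.toNat) : Nat)) : Int) - 1) - 1).toNat
        = (-b - 1).toNat - ((-b - 1).toNat &&& a.toNat) := by omega
    rw [ht, sub_and_eq_ldiff]
    simp only [Nat.testBit_ldiff]
    cases h1 : Nat.testBit a.toNat k <;> cases h2 : Nat.testBit (-b - 1).toNat k <;> simp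
  · have hx : (0:Int) ≤ ((-a - 1).toNat - ((-a - 1).toNat &&& b.toNat) : Nat) := by positivity
    have hneg : ¬ (0:Int) ≤ -((((-a - 1).toNat - ((-a - 1).toNat &&& b.toNat) : Nat)) : Int) - 1 := by omega
    rw [if_neg hneg]
    have ht : (-(-((((-a - 1).toNat - ((-a - 1).toNat &&& b.toNat) : Nat)) : Int) - 1) - 1).toNat
        = (-a - 1).toNat - ((-a - 1).toNat &&& b.toNat) := by omega
    rw [ht, sub_and_eq_ldiff]
    simp only [Nat.testBit_ldiff]
    cases h1 : Nat.testBit (-a - 1).toNat k <;> cases h2 : Nat.testBit b.toNat k <;> simp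
  · have hneg : ¬ (0:Int) ≤ -(((((-a - 1).toNat &&& (-b - 1).toNat) : Nat)) : Int) - 1 := by omega
    rw [if_neg hneg]
    have ht : (-(-((((-a - 1).toNat &&& (-b - 1).toNat : Nat)) : Int) - 1) - 1).toNat
        = (-a - 1).toNat &&& (-b - 1).toNat := by omega
    rw [ht]
    simp

lemma intBit_inj {a b : Int} (h : ∀ k, intBit a k = intBit b k) : a = b := by
  unfold intBit at h
  by_cases ha : 0 ≤ a <;> by_cases hb : 0 ≤ b
  · have := Nat.eq_of_testBit_eq (fun k => by simpa [ha, hb] using h k)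
    omega
  · exfalso
    obtain ⟨k, hk1, hk2⟩ : ∃ k, a.toNat < 2 ^ k ∧ (-b - 1).toNat < 2 ^ k :=
      ⟨a.toNat + (-b - 1).toNat, by
        have h1 := Nat.lt_two_pow_self (n := a.toNat + (-b - 1).toNat)
        constructor <;> omega⟩
    have h1 := Nat.testBit_eq_false_of_lt hk1
    have h2 := Nat.testBit_eq_false_of_lt hk2
    have e : (-b - 1).toNat = (-b).toNat - 1 := by omega
    rw [e] at h2
    have := h k
    simp [ha, hb, h1, h2] at this
  · exfalso
    obtain ⟨k, hk1, hk2⟩ : ∃ k, b.toNat < 2 ^ k ∧ (-a - 1).toNat < 2 ^ k :=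
      ⟨b.toNat + (-a - 1).toNat, by
        have h1 := Nat.lt_two_pow_self (n := b.toNat + (-a - 1).toNat)
        constructor <;> omega⟩
    have h1 := Nat.testBit_eq_false_of_lt hk1
    have h2 := Nat.testBit_eq_false_of_lt hk2
    have e : (-a - 1).toNat = (-a).toNat - 1 := by omega
    rw [e] at h2
    have := h k
    simp [ha, hb, h1, h2] at this
  · have := Nat.eq_of_testBit_eq (x := (-a - 1).toNat) (y := (-b - 1).toNat)
      (fun k => by
        have := h k; simp [ha, hb] at this
        have e1 : (-a - 1).toNat = (-a).toNat - 1 := by omega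
        have e2 : (-b - 1).toNat = (-b).toNat - 1 := by omega
        rw [e1, e2]; exact this)
    omega

lemma bor_self (a : Int) : PySem.Int.bor a a = a := by
  apply intBit_inj; intro k; simp [intBit_bor]

-- If all bits of (bor a x) lie inside m, then all bits of a do.
lemma bor_absorb_left {a x m : Int} (h : PySem.Int.bor (PySem.Int.bor a x) m = m) :
    PySem.Int.bor a m = m := by
  apply intBit_inj; intro k
  have hk : (intBit a k || intBit x k || intBit m k) = intBit m k := by
    rw [← intBit_bor, ← intBit_bor, h]
  rw [intBit_bor]
  cases h1 : intBit a k <;> cases h2 : intBit x k <;> cases h3 : intBit m k <;>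
    simp_all

-- Bits accumulated into the running OR never disappear.
lemma foldl_bor_fixed {m : Int} :
    ∀ (c : List Int) (a : Int),
      List.foldl (fun p q => PySem.Int.bor p q) a c = m → PySem.Int.bor a m = m := by
  intro c
  induction c with
  | nil => intro a h; simp at h; rw [h]; exact bor_self m
  | cons x rest ih =>
      intro a h
      exact bor_absorb_left (ih (PySem.Int.bor a x) h)

-- The pruning DFS computes exactly the filtered combination list.
lemma dfsGroups_eq_filter (m : Int) :
    ∀ (xs : List Int) (k : Nat) (acc : Int),
      dfsGroups m acc k xs
        = (pyCombinations k xs).filter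
            (fun c => decide (List.foldl (fun p q => PySem.Int.bor p q) acc c = m)) := by
  intro xs
  induction xs with
  | nil =>
      intro k acc
      cases k with
      | zero => by_cases hm : acc = m <;> simp [dfsGroups, pyCombinations, List.filter, hm]
      | succ t => simp [dfsGroups, pyCombinations]
  | cons x rest ih =>
      intro k acc
      cases k with
      | zero => by_cases hm : acc = m <;> simp [dfsGroups, pyCombinations, List.filter, hm]
      | succ t =>
          rw [dfsGroups, pyCombinations, List.filter_append, List.filter_map]
          have hcomp :
              ((fun c => decide (List.foldl (fun p q => PySem.Int.bor p q) acc c = m)) ∘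
                (fun c => x :: c))
              = fun c => decide (List.foldl (fun p q => PySem.Int.bor p q) (PySem.Int.bor acc x) c = m) := by
            funext c; simp [List.foldl]
          rw [hcomp, ← ih t (PySem.Int.bor acc x), ← ih (t + 1) acc]
          by_cases hp : PySem.Int.bor (PySem.Int.bor acc x) m = m
          · rw [if_pos hp]
          · rw [if_neg hp]
            have hnil :
                dfsGroups m (PySem.Int.bor acc x) t rest = [] := by
              rw [ih t (PySem.Int.bor acc x)]
              apply List.filter_eq_nil_iff.mpr
              intro c _ hc
              simp only [decide_eq_true_eq] at hc
              exact hp (foldl_bor_fixed c (PySem.Int.bor acc x) hc)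
            rw [hnil]; simp

-- A frame that needs more elements than remain produces nothing.
lemma dfsGroups_eq_nil_of_short (m : Int) :
    ∀ (items : List Int) (t : Nat) (acc : Int), items.length < t + 1 →
      dfsGroups m acc (t + 1) items = [] := by
  intro items
  induction items with
  | nil => intro t acc _; rfl
  | cons x tail ih =>
      intro t acc h
      simp only [List.length_cons] at h
      match t, h with
      | t + 1, h =>
        rw [dfsGroups]
        rw [ih t (PySem.Int.bor acc x) (by omega), ih (t + 1) acc (by omega)]
        simp

-- The stack machine processes frames depth-first: its output is the frames' outputs in order.
lemma stackRun_eq (m : Int) (stack : List (List Int × Int × Nat × List Int))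
    (res : List (List Int)) :
    stackRun m stack res = res ++ (stack.map (frameOut m)).flatten := by
  induction stack, res using stackRun.induct m with
  | case1 res => simp [stackRun]
  | case2 res items acc chosen rest ih =>
      rw [stackRun]
      split_ifs at ih ⊢ with hm <;> simp [frameOut, dfsGroups, hm, ih]
  | case3 res acc chosen rest t ih =>
      rw [stackRun, ih]
      simp [frameOut, dfsGroups]
  | case4 res acc chosen rest t x tail h ih =>
      rw [stackRun]
      simp only [if_pos h]
      rw [ih]
      have hz := dfsGroups_eq_nil_of_short m (x :: tail) t acc (by simpa using h)
      simp [frameOut, hz]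
  | case5 res acc chosen rest t x tail h ih =>
      rw [stackRun]
      simp only [if_neg h]
      split_ifs at ih ⊢ with hp <;>
        simp [hp, frameOut, dfsGroups, ih, Function.comp, List.append_assoc]

-- ===== VERDICT (by name: the statement is the Claim_ definition above) =====
theorem find_groups_that_match_spec : Claim_equal_find_groups_that_match := by
  intro iterable match_ size_of_group _hDom _hPre
  unfold Spec_find_groups_that_match find_groups_that_match find_groups_that_match_alt
  rw [stackRun_eq]
  simp only [List.map_cons, List.map_nil, List.flatten, List.nil_append]
  unfold frameOut
  rw [dfsGroups_eq_filter]
  rw [PySem.List.foldl_append_ite_eq_filter]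
  simp
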